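-- pv_equiv track=rewrite | github.com/quyenxtran/AutoResearch-SMB | benchmarks/agent_evidence.py | evidence_refs_are_grounded
-- ===== SOURCE A (Python) =====
-- from typing import Dict, List, Optional, Sequence, Tuple
--
-- def evidence_refs_are_grounded(evidence_refs: Sequence[str], run_names: Sequence[str]) -> bool:
--     refs = [str(item).strip() for item in evidence_refs if str(item).strip()]
--     catalog = [str(item).strip() for item in run_names if str(item).strip()]
--     if not refs or not catalog:
--         return False
--     for ref in refs:
--         if not any((run_name == ref) or (run_name in ref) for run_name in catalog):
--             return False
--     return True
-- ===== SOURCE B (Python) =====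
-- def evidence_refs_are_grounded(evidence_refs, run_names):
--     pending = [s for s in (str(item).strip() for item in evidence_refs) if s]
--     catalog = [s for s in (str(item).strip() for item in run_names) if s]
--     if not pending or not catalog:
--         return False
--     for name in catalog:
--         pending = [ref for ref in pending if name not in ref]
--         if not pending:
--             return True
--     return False
-- ===== Notes on version B (the rewrite author's own statement) =====
-- stated objective: alternative
-- what changed: Inverts the loop nesting: instead of testing each ref against the whole catalog with any(), B iterates over catalog names and shrinks a pending list of still-unmatched refs (the redundant == test is dropped, subsumed by substring containment), returning True as soon as the pending list empties.
import Mathlib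
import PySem

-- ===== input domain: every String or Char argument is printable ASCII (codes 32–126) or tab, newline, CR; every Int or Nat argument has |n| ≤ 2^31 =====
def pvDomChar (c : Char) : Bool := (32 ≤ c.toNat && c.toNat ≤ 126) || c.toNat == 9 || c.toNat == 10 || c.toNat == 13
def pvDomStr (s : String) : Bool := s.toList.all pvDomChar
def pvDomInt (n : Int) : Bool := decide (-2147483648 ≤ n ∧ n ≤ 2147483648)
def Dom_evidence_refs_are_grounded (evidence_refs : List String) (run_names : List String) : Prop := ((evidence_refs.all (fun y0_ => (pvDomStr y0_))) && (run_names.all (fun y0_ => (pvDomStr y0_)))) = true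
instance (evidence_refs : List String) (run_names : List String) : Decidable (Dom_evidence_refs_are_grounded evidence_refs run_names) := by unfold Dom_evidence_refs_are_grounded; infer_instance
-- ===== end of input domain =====

-- B inverts the loop nesting: it iterates over catalog names, shrinking a pending list of unmatched refs (the == test is dropped as subsumed by substring containment); same asymptotic cost, alternative structure.


-- ===== PORT A =====
def evidence_refs_are_grounded (evidence_refs : List String) (run_names : List String) : Bool :=
  let refs := (evidence_refs.filter (fun item => PySem.Str.strip item ≠ "")).map PySem.Str.strip
  let catalog := (run_names.filter (fun item => PySem.Str.strip item ≠ "")).map PySem.Str.strip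
  if refs = [] ∨ catalog = [] then false
  else refs.all (fun ref => catalog.any (fun run_name => run_name == ref || PySem.Str.isIn run_name ref))

-- ===== PORT B =====
-- B's catalog loop: shrink the pending list per run_name; True as soon as it empties, False after the loop.
def pvGoB (pending : List String) : List String → Bool
  | [] => false
  | name :: rest =>
    if pending.filter (fun ref => !(PySem.Str.isIn name ref)) = [] then true
    else pvGoB (pending.filter (fun ref => !(PySem.Str.isIn name ref))) rest

def evidence_refs_are_grounded_alt (evidence_refs : List String) (run_names : List String) : Bool :=
  let pending := (evidence_refs.filter (fun item => PySem.Str.strip item ≠ "")).map PySem.Str.strip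
  let catalog := (run_names.filter (fun item => PySem.Str.strip item ≠ "")).map PySem.Str.strip
  if pending = [] ∨ catalog = [] then false
  else pvGoB pending catalog

-- ===== PRECONDITION & SPEC =====
def Spec_evidence_refs_are_grounded (evidence_refs : List String) (run_names : List String) (out : Bool) : Prop := out = evidence_refs_are_grounded_alt evidence_refs run_names
instance (evidence_refs : List String) (run_names : List String) (out : Bool) : Decidable (Spec_evidence_refs_are_grounded evidence_refs run_names out) := by unfold Spec_evidence_refs_are_grounded; infer_instance

-- ===== CLAIM (what is proved, stated in full; the proofs are below) =====
def Claim_equal_evidence_refs_are_grounded : Prop := ∀ (evidence_refs : List String) (run_names : List String), Dom_evidence_refs_are_grounded evidence_refs run_names → Spec_evidence_refs_are_grounded evidence_refs run_names (evidence_refs_are_grounded evidence_refs run_names)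

-- ===== LEMMAS AND PROOFS =====

theorem pv_isIn_self (s : String) : PySem.Str.isIn s s = true :=
  (PySem.Chars.isIn_iff_infix s.toList s.toList).mpr (List.infix_refl _)

theorem pv_beq_or_isIn (n r : String) :
    (n == r || PySem.Str.isIn n r) = PySem.Str.isIn n r := by
  by_cases h : n = r
  · subst h
    rw [pv_isIn_self n]
    simp
  · have hb : (n == r) = false := beq_eq_false_iff_ne.mpr h
    rw [hb, Bool.false_or]

theorem pv_all_or_filter {α : Type} (xs : List α) (p q : α → Bool) :
    xs.all (fun x => p x || q x) = (xs.filter (fun x => !p x)).all q := by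
  induction xs with
  | nil => rfl
  | cons x xs ih =>
    by_cases h : p x = true
    · simp only [List.all_cons, List.filter_cons, h, Bool.true_or, Bool.not_true,
        Bool.true_and, if_neg (by simp : ¬ (false = true))]
      exact ih
    · have h' : p x = false := by revert h; cases p x <;> simp
      simp only [List.all_cons, List.filter_cons, h', Bool.false_or, Bool.not_false,
        if_true, List.all_cons]
      rw [ih]

theorem pvGoB_eq (catalog : List String) :
    ∀ pending : List String, pending ≠ [] →
    pvGoB pending catalog
      = pending.all (fun ref => catalog.any (fun n => PySem.Str.isIn n ref)) := by
  induction catalog with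
  | nil =>
    intro pending hp
    cases pending with
    | nil => exact absurd rfl hp
    | cons a t => simp [pvGoB]
  | cons name rest ih =>
    intro pending hp
    rw [pvGoB]
    by_cases he : pending.filter (fun ref => !(PySem.Str.isIn name ref)) = []
    · rw [if_pos he]
      rw [List.filter_eq_nil_iff] at he
      have hall : ∀ ref ∈ pending, PySem.Str.isIn name ref = true := by
        intro ref hr
        have h1 := he ref hr
        revert h1
        cases PySem.Str.isIn name ref <;> simp
      symm
      simp only [List.all_eq_true]
      intro ref hr
      simp only [List.any_cons, hall ref hr, Bool.true_or]
    · rw [if_neg he, ih _ he]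
      have := pv_all_or_filter pending (fun ref => PySem.Str.isIn name ref)
        (fun ref => rest.any (fun n => PySem.Str.isIn n ref))
      simp only [List.any_cons] at this ⊢
      exact this.symm

-- ===== VERDICT (by name: the statement is the Claim_ definition above) =====
theorem evidence_refs_are_grounded_spec : Claim_equal_evidence_refs_are_grounded := by
  intro evidence_refs run_names _
  unfold Spec_evidence_refs_are_grounded
  unfold evidence_refs_are_grounded evidence_refs_are_grounded_alt
  set pending := (evidence_refs.filter (fun item => PySem.Str.strip item ≠ "")).map PySem.Str.strip with hpend
  set catalog := (run_names.filter (fun item => PySem.Str.strip item ≠ "")).map PySem.Str.strip with hcat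
  by_cases hg : pending = [] ∨ catalog = []
  · simp [hg]
  · rw [not_or] at hg
    simp only [if_neg (by simp [hg.1, hg.2] : ¬ (pending = [] ∨ catalog = []))]
    rw [pvGoB_eq catalog pending hg.1]
    congr 1
    funext ref
    congr 1
    funext n
    exact pv_beq_or_isIn n ref
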